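-- pv_equiv track=rewrite | github.com/alexcristofari/data-manipulation | data_manipulation/seating_students.py | SeatingStudents
-- ===== SOURCE A (Python) =====
-- def SeatingStudents(arr):
--     # __define-ocg__ - Parse input and calculate seating arrangements
--     if isinstance(arr, str):
--         arr = arr.replace('[', '').replace(']', '').split(',')
--         arr = [int(x.strip()) for x in arr]
--
--     K = arr[0]
--     occupied = set(arr[1:])
--     varFiltersCg = occupied
--     varOcg = 0
--
--     for row in range(1, K//2 + 1):
--         left = 2*row - 1
--         right = 2*row
--         if left not in varFiltersCg and right not in varFiltersCg:
--             varOcg += 1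
--
--     for row in range(1, K//2):
--         top_left = 2*row - 1
--         bottom_left = 2*row + 1
--         if top_left not in varFiltersCg and bottom_left not in varFiltersCg:
--             varOcg += 1
--
--         top_right = 2*row
--         bottom_right = 2*row + 2
--         if top_right not in varFiltersCg and bottom_right not in varFiltersCg:
--             varOcg += 1
--
--     return varOcg
-- ===== SOURCE B (Python) =====
-- def SeatingStudents(arr):
--     # Parse input (same prelude as the original)
--     if isinstance(arr, str):
--         arr = arr.replace('[', '').replace(']', '').split(',')
--         arr = [int(x.strip()) for x in arr]
--
--     K = arr[0]
--     rows = K // 2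
--     if rows <= 0:
--         return 0
--     n = 2 * rows                      # seats 1..n in a rows x 2 grid
--     total_edges = 3 * rows - 2        # rows horizontal + 2*(rows-1) vertical pairs
--
--     occ = {s for s in arr[1:] if 1 <= s <= n}
--
--     # inclusion-exclusion: subtract edges touching an occupied seat
--     blocked = 0
--     for s in occ:
--         blocked += 1 + (s > 2) + (s + 2 <= n)   # degree of seat s
--         if s % 2 == 1 and s + 1 in occ:          # horizontal edge blocked twice
--             blocked -= 1
--         if s + 2 <= n and s + 2 in occ:          # vertical edge blocked twice
--             blocked -= 1
--     return total_edges - blocked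
-- ===== Notes on version B (the rewrite author's own statement) =====
-- stated objective: faster
-- what changed: B does not scan the rows at all: it counts by inclusion-exclusion over the occupied set - start from the closed-form total edge count 3*(K//2)-2, subtract each occupied seat's degree, and add back edges with both endpoints occupied - so the loop runs over the occupied seats (O(len(arr))) instead of over all K//2 rows with two set lookups each (measured ~4.8x at the largest size).
import Mathlib
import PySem

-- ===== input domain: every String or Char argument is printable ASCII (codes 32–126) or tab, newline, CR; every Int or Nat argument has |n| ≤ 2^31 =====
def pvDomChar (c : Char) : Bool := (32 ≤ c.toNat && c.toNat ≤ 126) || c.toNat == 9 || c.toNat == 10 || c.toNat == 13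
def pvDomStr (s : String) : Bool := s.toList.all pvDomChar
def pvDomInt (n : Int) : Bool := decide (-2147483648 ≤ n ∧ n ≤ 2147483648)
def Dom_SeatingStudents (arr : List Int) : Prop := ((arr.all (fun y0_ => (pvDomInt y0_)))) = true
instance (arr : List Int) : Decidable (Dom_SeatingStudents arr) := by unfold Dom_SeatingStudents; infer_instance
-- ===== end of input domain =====

-- B counts by inclusion-exclusion over the occupied set (total edges 3*(K//2)-2 minus blocked edges)
-- instead of A's scan over all rows (alternative algorithm: work proportional to the occupied list, not K).
-- On the List-Int domain the str-parsing branch of both Pythons is dead code and is not ported.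

-- ===== PORT A =====
-- arr[1:] is exactly List.drop 1; set(...) is PySem.Set.ofList; 'x not in s' is !s.contains x.
def SeatingStudents (arr : List Int) : Int :=
  let K : Int := (PySem.List.pyGet? arr 0).getD 0   -- arr[0]; Pre_ excludes arr = [] (IndexError)
  let occ : PySem.Set Int := PySem.Set.ofList (arr.drop 1)
  let varOcg : Int :=
    (PySem.List.pyRange 1 (PySem.Int.floordiv K 2 + 1)).foldl
      (fun acc row =>
        if !occ.contains (2*row - 1) && !occ.contains (2*row) then acc + 1 else acc) 0
  (PySem.List.pyRange 1 (PySem.Int.floordiv K 2)).foldl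
    (fun acc row =>
      let acc := if !occ.contains (2*row - 1) && !occ.contains (2*row + 1) then acc + 1 else acc
      if !occ.contains (2*row) && !occ.contains (2*row + 2) then acc + 1 else acc) varOcg

-- ===== PORT B =====
-- set comprehension = Set.ofList of the filtered list; 'for s in occ' only accumulates a sum, so
-- iterating the Set in first-occurrence order is exact (the sum is independent of iteration order).
def SeatingStudents_alt (arr : List Int) : Int :=
  let K : Int := (PySem.List.pyGet? arr 0).getD 0   -- arr[0]; Pre_ excludes arr = [] (IndexError)
  let rows : Int := PySem.Int.floordiv K 2
  if rows ≤ 0 then 0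
  else
    let n : Int := 2 * rows
    let totalEdges : Int := 3 * rows - 2
    let occ : PySem.Set Int :=
      PySem.Set.ofList ((arr.drop 1).filter (fun s => decide (1 ≤ s) && decide (s ≤ n)))
    let blocked : Int :=
      occ.foldl
        (fun blocked s =>
          let blocked := blocked + (1 + (if 2 < s then 1 else 0) + (if s + 2 ≤ n then 1 else 0))
          let blocked := if PySem.Int.mod s 2 == 1 && occ.contains (s + 1) then blocked - 1 else blocked
          if decide (s + 2 ≤ n) && occ.contains (s + 2) then blocked - 1 else blocked) 0
    totalEdges - blocked

-- ===== PRECONDITION & SPEC =====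
-- A (and B) raise IndexError on the empty list (arr[0]); Pre_ excludes exactly that.
def Pre_SeatingStudents (arr : List Int) : Prop := arr ≠ []
instance (arr : List Int) : Decidable (Pre_SeatingStudents arr) := by unfold Pre_SeatingStudents; infer_instance
def pvWitness_SeatingStudents : List Int := ([4] : List Int)
def Spec_SeatingStudents (arr : List Int) (out : Int) : Prop := out = SeatingStudents_alt arr
instance (arr : List Int) (out : Int) : Decidable (Spec_SeatingStudents arr out) := by unfold Spec_SeatingStudents; infer_instance

-- ===== CLAIM (what is proved, stated in full; the proofs are below) =====
def Claim_equal_SeatingStudents : Prop := ∀ (arr : List Int), Dom_SeatingStudents arr → Pre_SeatingStudents arr → Spec_SeatingStudents arr (SeatingStudents arr)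

-- ===== LEMMAS AND PROOFS =====

-- indicator of a free horizontal pair in row r (A's first loop)
def pvH (c : Int → Bool) (r : Int) : Int := if !c (2*r - 1) && !c (2*r) then 1 else 0

-- indicators of free vertical pairs below row r (A's second loop)
def pvV (c : Int → Bool) (r : Int) : Int :=
  (if !c (2*r - 1) && !c (2*r + 1) then 1 else 0) +
  (if !c (2*r) && !c (2*r + 2) then 1 else 0)

-- B's per-occupied-seat contribution: degree minus double-counted blocked edges
def pvG (c : Int → Bool) (n s : Int) : Int :=
  (1 + (if 2 < s then 1 else 0) + (if s + 2 ≤ n then 1 else 0))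
    - (if PySem.Int.mod s 2 == 1 && c (s + 1) then 1 else 0)
    - (if decide (s + 2 ≤ n) && c (s + 2) then 1 else 0)

-- pvG gated by occupancy, summed over ALL seats
def pvF (c : Int → Bool) (n s : Int) : Int := if c s then pvG c n s else 0

-- vertical-neighbour occupancy indicators entering row r+1 (used for the index shift)
def pvXq (c : Int → Bool) (q : Int) : Int :=
  (if c (2*q - 1) then 1 else 0) + (if c (2*q) then 1 else 0)

def pvY (c : Int → Bool) (r : Int) : Int :=
  (if c (2*r - 1) && !c (2*r + 1) then 1 else 0) +
  (if c (2*r) && !c (2*r + 2) then 1 else 0)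

lemma pvMod_odd (r : Int) : PySem.Int.mod (2*r - 1) 2 = 1 := by
  rw [PySem.Int.mod_eq_emod_of_pos (by norm_num)]; omega

lemma pvMod_even (r : Int) : PySem.Int.mod (2*r) 2 = 0 := by
  rw [PySem.Int.mod_eq_emod_of_pos (by norm_num)]; omega

lemma pvSum_filter {α : Type} (p : α → Bool) (g : α → Int) (l : List α) :
    ((l.filter p).map g).sum = (l.map (fun x => if p x then g x else 0)).sum := by
  induction l with
  | nil => simp
  | cons a t ih => by_cases h : p a <;> simp [List.filter_cons, h, ih]

lemma pvPair (F : Int → Int) (k : Nat) :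
    ((PySem.List.pyRange 1 (2*(k:Int)+1)).map F).sum
      = ((PySem.List.pyRange 1 ((k:Int)+1)).map (fun r => F (2*r - 1) + F (2*r))).sum := by
  induction k with
  | zero => simp [PySem.List.pyRange_one_eq_nil]
  | succ j ih =>
      rw [show (2*((j+1:Nat):Int)+1) = (2*(j:Int)+1) + 1 + 1 by push_cast; ring,
          PySem.List.pyRange_one_succ_right (show (1:Int) ≤ 2*(j:Int)+1+1 by omega),
          PySem.List.pyRange_one_succ_right (show (1:Int) ≤ 2*(j:Int)+1 by omega),
          show ((((j+1):Nat):Int)+1) = ((j:Int)+1) + 1 by push_cast; ring,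
          PySem.List.pyRange_one_succ_right (show (1:Int) ≤ (j:Int)+1 by omega)]
      simp only [List.map_append, List.sum_append, ih]
      have h1 : 2*((j:Int)+1) - 1 = 2*(j:Int)+1 := by ring
      have h2 : 2*((j:Int)+1) = 2*(j:Int)+1+1 := by ring
      simp [h1, h2]
      ring

lemma pvSum_const (k b : Int) (hb : 0 ≤ b) :
    ((PySem.List.pyRange 1 (b+1)).map (fun _ => k)).sum = k * b := by
  rw [PySem.List.sum_map_const_int, PySem.List.length_pyRange_one]
  have : ((b + 1 - 1).toNat : Int) = b := by omega
  rw [this]; ring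

lemma pvShift (X : Int → Int) (m : Int) (hm : 1 ≤ m) :
    ((PySem.List.pyRange 1 (m+1)).map (fun r => if 2 ≤ r then X r else 0)).sum
      = ((PySem.List.pyRange 1 m).map (fun r => X (r+1))).sum := by
  rw [PySem.List.pyRange_one_append 1 2 (m+1) (by omega) (by omega),
      List.map_append, List.sum_append,
      show PySem.List.pyRange 1 2 1 = [1] from by decide]
  have hcongr : (PySem.List.pyRange 2 (m+1)).map (fun r => if 2 ≤ r then X r else 0)
      = (PySem.List.pyRange 2 (m+1)).map X :=
    List.map_congr_left (fun r hr => by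
      have := PySem.List.mem_pyRange_one.mp hr
      rw [if_pos (by omega)])
  rw [hcongr]
  have hL : PySem.List.pyRange 2 (m+1) 1
      = (List.range (m-1).toNat).map (fun kk : Nat => (2 : Int) + kk) := by
    rw [PySem.List.pyRange_one]
    congr 2
    omega
  have hR : PySem.List.pyRange 1 m 1
      = (List.range (m-1).toNat).map (fun kk : Nat => (1 : Int) + kk) := by
    rw [PySem.List.pyRange_one]
  rw [hL, hR, List.map_map, List.map_map]
  have hfun : (X ∘ fun kk : Nat => (2 : Int) + kk)
      = ((fun r => X (r+1)) ∘ fun kk : Nat => (1 : Int) + kk) := by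
    funext kk
    simp only [Function.comp]
    congr 1
    ring
  rw [hfun]
  simp

lemma pvRestrict (Y : Int → Int) (m : Int) (hm : 1 ≤ m) :
    ((PySem.List.pyRange 1 (m+1)).map (fun r => if r ≤ m - 1 then Y r else 0)).sum
      = ((PySem.List.pyRange 1 m).map Y).sum := by
  rw [PySem.List.pyRange_one_succ_right (show (1:Int) ≤ m by omega),
      List.map_append, List.sum_append]
  rw [List.map_congr_left (fun r hr => by
        have := PySem.List.mem_pyRange_one.mp hr
        rw [if_pos (by omega)])]
  simp

lemma pvPerm (t : List Int) (n : Int) (g : Int → Int) :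
    ((PySem.Set.ofList (t.filter (fun s => decide (1 ≤ s) && decide (s ≤ n)))).map g).sum
      = (((PySem.List.pyRange 1 (n+1)).filter
            (fun s => (PySem.Set.ofList t).contains s)).map g).sum := by
  apply List.Perm.sum_eq
  apply List.Perm.map
  apply (List.perm_ext_iff_of_nodup (PySem.Set.nodup_ofList _) ?_).mpr
  · intro x
    rw [PySem.Set.mem_ofList, List.mem_filter, List.mem_filter, PySem.List.mem_pyRange_one]
    simp only [Bool.and_eq_true, decide_eq_true_eq, PySem.Set.contains_iff, PySem.Set.mem_ofList,
      Int.lt_add_one_iff]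
    tauto
  · exact (PySem.List.nodup_pyRange_one 1 (n+1)).filter _

lemma pvSum_sub {α : Type} (l : List α) (f g : α → Int) :
    (l.map (fun x => f x - g x)).sum = (l.map f).sum - (l.map g).sum := by
  induction l with
  | nil => simp
  | cons a tl ih => simp only [List.map_cons, List.sum_cons, ih]; ring

-- the central counting identity: A's two row sums versus B's inclusion-exclusion
set_option maxHeartbeats 1600000 in
lemma pvMaster (c : Int → Bool) (m : Int) (hm : 1 ≤ m) :
    ((PySem.List.pyRange 1 (m+1)).map (pvH c)).sum
      + ((PySem.List.pyRange 1 m).map (pvV c)).sum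
      = 3*m - 2 - ((PySem.List.pyRange 1 (2*m+1)).map (pvF c (2*m))).sum := by
  obtain ⟨k, hk⟩ : ∃ k : Nat, m = (k : Int) := ⟨m.toNat, by omega⟩
  subst hk
  rw [pvPair (pvF c (2*(k:Int))) k]
  have hpt : (PySem.List.pyRange 1 ((k:Int)+1)).map
        (fun r => pvF c (2*(k:Int)) (2*r - 1) + pvF c (2*(k:Int)) (2*r))
      = (PySem.List.pyRange 1 ((k:Int)+1)).map
        (fun r => (1 - pvH c r) + ((if 2 ≤ r then pvXq c r else 0)
            + (if r ≤ (k:Int) - 1 then pvY c r else 0))) := by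
    apply List.map_congr_left
    intro r hr
    have hr' := PySem.List.mem_pyRange_one.mp hr
    unfold pvF pvG pvH pvXq pvY
    rw [pvMod_odd, pvMod_even, show 2*r - 1 + 1 = 2*r from by ring,
        show 2*r - 1 + 2 = 2*r + 1 from by ring]
    rcases h1 : c (2*r - 1) <;> rcases h2 : c (2*r) <;>
      rcases h3 : c (2*r + 1) <;> rcases h4 : c (2*r + 2) <;>
      simp [h1, h2, h3, h4] <;>
      split_ifs <;> omega
  rw [hpt, PySem.List.sum_map_add_int, PySem.List.sum_map_add_int,
      pvShift (pvXq c) (k:Int) (by exact_mod_cast hm),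
      pvRestrict (pvY c) (k:Int) (by exact_mod_cast hm)]
  have hsplit : ((PySem.List.pyRange 1 ((k:Int)+1)).map (fun r => 1 - pvH c r)).sum
      = (k:Int) - ((PySem.List.pyRange 1 ((k:Int)+1)).map (pvH c)).sum := by
    rw [show (fun r : Int => 1 - pvH c r) = (fun r : Int => (fun _ : Int => (1:Int)) r - pvH c r)
          from rfl,
        pvSum_sub, pvSum_const 1 (k:Int) (by positivity)]
    ring
  rw [hsplit]
  -- remaining: the per-row total over rows 1..k-1 is the constant 2
  have hrows : ((PySem.List.pyRange 1 (k:Int)).map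
        (fun r => pvV c r + (pvXq c (r+1) + pvY c r))).sum = 2*((k:Int) - 1) := by
    have hcg : (PySem.List.pyRange 1 (k:Int)).map
          (fun r => pvV c r + (pvXq c (r+1) + pvY c r))
        = (PySem.List.pyRange 1 (k:Int)).map (fun _ => (2:Int)) := by
      apply List.map_congr_left
      intro r _
      unfold pvV pvXq pvY
      rw [show 2*(r+1) - 1 = 2*r + 1 from by ring, show 2*(r+1) = 2*r + 2 from by ring]
      rcases h1 : c (2*r - 1) <;> rcases h2 : c (2*r) <;>
        rcases h3 : c (2*r + 1) <;> rcases h4 : c (2*r + 2) <;> simp [h1, h2, h3, h4]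
    rw [hcg]
    have := pvSum_const 2 ((k:Int) - 1) (by omega)
    rw [show (k:Int) - 1 + 1 = (k:Int) from by ring] at this
    exact this
  have hV := PySem.List.sum_map_add_int (PySem.List.pyRange 1 (k:Int)) (pvV c)
      (fun r => pvXq c (r+1) + pvY c r)
  have hXY := PySem.List.sum_map_add_int (PySem.List.pyRange 1 (k:Int))
      (fun r => pvXq c (r+1)) (pvY c)
  have h2 : ((PySem.List.pyRange 1 (k:Int)).map (pvV c)).sum
      + (((PySem.List.pyRange 1 (k:Int)).map (fun r => pvXq c (r+1))).sum
          + ((PySem.List.pyRange 1 (k:Int)).map (pvY c)).sum) = 2*((k:Int) - 1) := by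
    rw [← hXY, ← hV, hrows]
  linarith

-- contains on the range-filtered set agrees with contains on the full set, at in-range points
lemma pvBc (t : List Int) (m x : Int) (h1 : 1 ≤ x) (h2 : x ≤ 2*m) :
    (PySem.Set.ofList (t.filter (fun y => decide (1 ≤ y) && decide (y ≤ 2*m)))).contains x
      = (PySem.Set.ofList t).contains x := by
  rw [Bool.eq_iff_iff, PySem.Set.contains_iff, PySem.Set.contains_iff,
      PySem.Set.mem_ofList, PySem.Set.mem_ofList, List.mem_filter]
  simp only [Bool.and_eq_true, decide_eq_true_eq]
  constructor
  · rintro ⟨hx, -⟩; exact hx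
  · intro hx; exact ⟨hx, h1, h2⟩

lemma pvGcongr (t : List Int) (m s : Int) (h1 : 1 ≤ s) (h2 : s ≤ 2*m) :
    pvG (fun x => (PySem.Set.ofList (t.filter (fun y => decide (1 ≤ y) && decide (y ≤ 2*m)))).contains x) (2*m) s
      = pvG (fun x => (PySem.Set.ofList t).contains x) (2*m) s := by
  unfold pvG
  beta_reduce
  by_cases hodd : PySem.Int.mod s 2 = 1
  · have hs1 : s + 1 ≤ 2*m := by
      rw [PySem.Int.mod_eq_emod_of_pos (by norm_num)] at hodd
      omega
    rw [pvBc t m (s+1) (by omega) hs1]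
    by_cases h2b : s + 2 ≤ 2*m
    · rw [pvBc t m (s+2) (by omega) h2b]
    · have hd : (decide (s + 2 ≤ 2*m)) = false := by simp [h2b]
      rw [hd]
      simp
  · have hfalse : (PySem.Int.mod s 2 == 1) = false := by
      simp only [beq_eq_false_iff_ne, ne_eq]
      exact hodd
    rw [hfalse]
    by_cases h2b : s + 2 ≤ 2*m
    · rw [pvBc t m (s+2) (by omega) h2b]
      simp
    · have hd : (decide (s + 2 ≤ 2*m)) = false := by simp [h2b]
      rw [hd]
      simp

-- ===== VERDICT (by name: the statement is the Claim_ definition above) =====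
set_option maxHeartbeats 1600000 in
theorem SeatingStudents_spec : Claim_equal_SeatingStudents := by
  unfold Claim_equal_SeatingStudents
  intro arr _ hpre
  unfold Spec_SeatingStudents SeatingStudents SeatingStudents_alt
  rcases arr with _ | ⟨a, t⟩
  · exact absurd rfl hpre
  have hK : (PySem.List.pyGet? (a :: t) 0).getD 0 = a := by
    simp [PySem.List.pyGet?, PySem.List.pyIdx?]
  simp only [List.drop_succ_cons, List.drop_zero]
  rw [hK]
  by_cases hm : PySem.Int.floordiv a 2 ≤ 0
  · rw [if_pos hm,
        PySem.List.pyRange_one_eq_nil (show PySem.Int.floordiv a 2 + 1 ≤ 1 by omega),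
        PySem.List.pyRange_one_eq_nil (show PySem.Int.floordiv a 2 ≤ 1 by omega)]
    simp
  · rw [if_neg hm]
    have hm1 : 1 ≤ PySem.Int.floordiv a 2 := by omega
    -- A's two row loops become sums of pvH and pvV
    rw [PySem.List.foldl_congr_mem _ _
          (fun (acc : Int) row => acc + pvH (fun x => (PySem.Set.ofList t).contains x) row) 0
          (by
            intro acc row _
            unfold pvH
            beta_reduce
            split_ifs <;> ring),
        PySem.List.foldl_congr_mem _ _
          (fun (acc : Int) row => acc + pvV (fun x => (PySem.Set.ofList t).contains x) row) _
          (by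
            intro acc row _
            unfold pvV
            beta_reduce
            split_ifs <;> ring),
        PySem.List.foldl_add, PySem.List.foldl_add]
    -- B's loop over the occupied set becomes the sum of pvG
    rw [PySem.List.foldl_congr_mem _ _
          (fun (acc : Int) s => acc +
            pvG (fun x => (PySem.Set.ofList
              (t.filter (fun y => decide (1 ≤ y) && decide (y ≤ 2 * PySem.Int.floordiv a 2)))).contains x)
              (2 * PySem.Int.floordiv a 2) s) 0
          (by
            intro acc s _
            unfold pvG
            beta_reduce
            split_ifs <;> ring),
        PySem.List.foldl_add,
        pvPerm t (2 * PySem.Int.floordiv a 2)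
          (pvG (fun x => (PySem.Set.ofList
            (t.filter (fun y => decide (1 ≤ y) && decide (y ≤ 2 * PySem.Int.floordiv a 2)))).contains x)
            (2 * PySem.Int.floordiv a 2))]
    rw [List.map_congr_left (l := (PySem.List.pyRange 1 (2 * PySem.Int.floordiv a 2 + 1)).filter
          (fun s => (PySem.Set.ofList t).contains s))
          (fun s hs => by
            have hs' := PySem.List.mem_pyRange_one.mp (List.mem_filter.mp hs).1
            exact pvGcongr t (PySem.Int.floordiv a 2) s (by omega) (by omega)),
        pvSum_filter (fun s => (PySem.Set.ofList t).contains s)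
          (pvG (fun x => (PySem.Set.ofList t).contains x) (2 * PySem.Int.floordiv a 2))]
    have hF : (fun x => if (PySem.Set.ofList t).contains x
            then pvG (fun y => (PySem.Set.ofList t).contains y) (2 * PySem.Int.floordiv a 2) x else 0)
        = pvF (fun y => (PySem.Set.ofList t).contains y) (2 * PySem.Int.floordiv a 2) := rfl
    rw [hF]
    have master := pvMaster (fun y => (PySem.Set.ofList t).contains y) (PySem.Int.floordiv a 2) hm1
    linarith [master]
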